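-- pv_equiv track=rewrite | github.com/Twalaght/advent-of-code | 2023/day07/7_original.py | permute_joker
-- ===== SOURCE A (Python) =====
-- def permute_joker(hand: str) -> list[str]:
--     valid = "AKQT98765432"
--
--     if "J" not in hand: return [hand]
--
--     tmp = []
--     for char in valid:
--         new = hand.replace("J", char, 1)
--         tmp += permute_joker(new)
--
--     return tmp
-- ===== SOURCE B (Python) =====
-- def permute_joker(hand: str) -> list[str]:
--     valid = "AKQT98765432"
--
--     jpos = [i for i, c in enumerate(hand) if c == "J"]
--     if not jpos:
--         return [hand]
--
--     # build all assignments for the J positions, leftmost J varying slowest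
--     combos = [[]]
--     for _ in jpos:
--         combos = [prefix + [v] for prefix in combos for v in valid]
--
--     out = []
--     for combo in combos:
--         chars = list(hand)
--         for i, v in zip(jpos, combo):
--             chars[i] = v
--         out.append("".join(chars))
--     return out
-- ===== Notes on version B (the rewrite author's own statement) =====
-- stated objective: alternative
-- what changed: Replaces A's recursion that substitutes the first joker and recurses once per joker by a single scan collecting the joker positions, an iteratively built product of replacement tuples, and one in-place fill of those positions per tuple.
import Mathlib
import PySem

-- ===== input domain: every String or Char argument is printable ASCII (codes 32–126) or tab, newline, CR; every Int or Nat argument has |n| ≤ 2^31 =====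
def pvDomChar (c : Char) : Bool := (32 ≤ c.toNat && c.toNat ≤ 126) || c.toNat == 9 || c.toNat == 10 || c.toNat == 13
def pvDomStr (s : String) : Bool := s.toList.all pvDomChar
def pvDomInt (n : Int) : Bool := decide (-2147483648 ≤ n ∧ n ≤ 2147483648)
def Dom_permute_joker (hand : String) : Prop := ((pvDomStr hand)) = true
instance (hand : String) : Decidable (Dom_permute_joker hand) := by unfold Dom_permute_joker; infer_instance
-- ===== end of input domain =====

-- B replaces A's first-J recursion by one scan for the J positions plus an iteratively
-- built product of replacement tuples written into those positions (objective: alternative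
-- decomposition; same 12^k results in the same order).

-- ===== PORT A =====
-- valid = "AKQT98765432" (iterated character by character)
def pvValid : List Char := ['A', 'K', 'Q', 'T', '9', '8', '7', '6', '5', '4', '3', '2']

-- hand.replace("J", c, 1): replace only the FIRST 'J' (hand-port, exact: left-to-right scan)
def pvReplFirstJ : List Char → Char → List Char
  | [], _ => []
  | x :: xs, c => if x = 'J' then c :: xs else x :: pvReplFirstJ xs c

-- termination lemma for the port's recursion (cited by decreasing_by)
theorem pvReplFirstJ_count_lt (cs : List Char) (c : Char) (hc : c ≠ 'J') (hJ : 'J' ∈ cs) :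
    (pvReplFirstJ cs c).count 'J' < cs.count 'J' := by
  induction cs with
  | nil => cases hJ
  | cons x xs ih =>
    by_cases hx : x = 'J'
    · subst hx
      simp [pvReplFirstJ, hc]
    · have hJ' : 'J' ∈ xs := by
        rcases List.mem_cons.mp hJ with h | h
        · exact absurd h.symm hx
        · exact h
      simpa [pvReplFirstJ, hx, List.count_cons] using ih hJ'

theorem pvValid_ne_J : ∀ c ∈ pvValid, c ≠ 'J' := by
  intro c hc
  fin_cases hc <;> decide

def pvPermAuxA (cs : List Char) : List (List Char) :=
  if h : 'J' ∉ cs then [cs]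
  else
    pvValid.attach.foldl (fun tmp vc => tmp ++ pvPermAuxA (pvReplFirstJ cs vc.1)) []
termination_by cs.count 'J'
decreasing_by
  exact pvReplFirstJ_count_lt cs _ (pvValid_ne_J _ vc.2) (not_not.mp h)

def permute_joker (hand : String) : List String :=
  (pvPermAuxA hand.toList).map String.ofList

-- ===== PORT B =====
-- jpos = [i for i, c in enumerate(hand) if c == "J"]
def pvJpos : Nat → List Char → List Nat
  | _, [] => []
  | i, c :: cs => if c = 'J' then i :: pvJpos (i+1) cs else pvJpos (i+1) cs

-- combos = [prefix + [v] for prefix in combos for v in valid]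
def pvCombosStep (acc : List (List Char)) : List (List Char) :=
  acc.flatMap (fun p => pvValid.map (fun v => p ++ [v]))

-- the 'for _ in jpos' loop building the product (the loop only uses jpos's length)
def pvCombos (k : Nat) : List (List Char) :=
  (List.range k).foldl (fun acc _ => pvCombosStep acc) [[]]

-- chars = list(hand); for i, v in zip(jpos, combo): chars[i] = v  (indices are in range)
def pvFill (cs : List Char) (ps : List Nat) (combo : List Char) : List Char :=
  (ps.zip combo).foldl (fun acc iv => acc.set iv.1 iv.2) cs

def permute_joker_alt (hand : String) : List String :=
  let cs := hand.toList
  let ps := pvJpos 0 cs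
  if ps = [] then [hand]
  else (pvCombos ps.length).map (fun combo => String.ofList (pvFill cs ps combo))

-- ===== PRECONDITION & SPEC =====
def Spec_permute_joker (hand : String) (out : List String) : Prop := out = permute_joker_alt hand
instance (hand : String) (out : List String) : Decidable (Spec_permute_joker hand out) := by unfold Spec_permute_joker; infer_instance

-- ===== CLAIM (what is proved, stated in full; the proofs are below) =====
def Claim_equal_permute_joker : Prop := ∀ (hand : String), Dom_permute_joker hand → Spec_permute_joker hand (permute_joker hand)

-- ===== LEMMAS AND PROOFS =====

-- canonical expansion both ports are proved equal to
def pvExpand : List Char → List (List Char)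
  | [] => [[]]
  | c :: cs =>
    if c = 'J' then pvValid.flatMap (fun v => (pvExpand cs).map (v :: ·))
    else (pvExpand cs).map (c :: ·)

theorem pvExpand_no_J (cs : List Char) (h : 'J' ∉ cs) : pvExpand cs = [cs] := by
  induction cs with
  | nil => rfl
  | cons c cs ih =>
    have hc : c ≠ 'J' := fun hc => h (by simp [hc])
    have h' : 'J' ∉ cs := fun hm => h (List.mem_cons_of_mem _ hm)
    simp [pvExpand, hc, ih h']

theorem pvExpand_replFirst (cs : List Char) (h : 'J' ∈ cs) :
    pvExpand cs = pvValid.flatMap (fun v => pvExpand (pvReplFirstJ cs v)) := by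
  induction cs with
  | nil => cases h
  | cons c cs ih =>
    by_cases hc : c = 'J'
    · subst hc
      simp only [pvExpand, pvReplFirstJ, if_pos]
      refine List.flatMap_congr (fun v hv => ?_)
      have hv' : v ≠ 'J' := pvValid_ne_J v hv
      simp [hv']
    · have h' : 'J' ∈ cs := by
        rcases List.mem_cons.mp h with h0 | h0
        · exact absurd h0.symm hc
        · exact h0
      simp only [pvExpand, if_neg hc]
      rw [ih h', List.map_flatMap]
      refine List.flatMap_congr (fun v hv => ?_)
      simp [pvReplFirstJ, pvExpand, hc]

theorem pvPermAuxA_eq_expand (cs : List Char) : pvPermAuxA cs = pvExpand cs := by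
  have H : ∀ n (cs : List Char), cs.count 'J' = n → pvPermAuxA cs = pvExpand cs := by
    intro n
    induction n using Nat.strong_induction_on with
    | _ n ih =>
      intro cs hn
      by_cases h : 'J' ∉ cs
      · rw [pvPermAuxA, dif_pos h, pvExpand_no_J cs h]
      · rw [pvPermAuxA, dif_neg h]
        have hmem : 'J' ∈ cs := not_not.mp h
        rw [PySem.List.foldl_append_eq_flatMap, List.nil_append,
            pvExpand_replFirst cs hmem]
        have hattach : pvValid.attach.flatMap (fun vc => pvPermAuxA (pvReplFirstJ cs vc.1))
            = pvValid.flatMap (fun v => pvPermAuxA (pvReplFirstJ cs v)) := by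
          conv_rhs => rw [← List.attach_map_subtype_val (l := pvValid)]
          rw [List.flatMap_map]
        rw [hattach]
        refine List.flatMap_congr (fun v hv => ?_)
        have hlt : (pvReplFirstJ cs v).count 'J' < n :=
          hn ▸ pvReplFirstJ_count_lt cs v (pvValid_ne_J v hv) hmem
        exact ih _ hlt _ rfl
  exact H _ cs rfl

-- ---- B side ----

theorem pvJpos_nil_iff (cs : List Char) : ∀ i, pvJpos i cs = [] ↔ 'J' ∉ cs := by
  induction cs with
  | nil => simp [pvJpos]
  | cons c cs ih =>
    intro i
    by_cases hc : c = 'J'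
    · subst hc; simp [pvJpos]
    · have hc' : ¬ ('J' = c) := fun h => hc h.symm
      simp [pvJpos, hc, hc', ih (i+1)]

theorem pvJpos_shift (cs : List Char) : ∀ i, pvJpos (i+1) cs = (pvJpos i cs).map (· + 1) := by
  induction cs with
  | nil => intro i; rfl
  | cons c cs ih =>
    intro i
    by_cases hc : c = 'J' <;> simp [pvJpos, hc, ih (i+1)]

theorem pvFill_cons (cs : List Char) (p : Nat) (ps : List Nat) (v : Char) (combo : List Char) :
    pvFill cs (p :: ps) (v :: combo) = pvFill (cs.set p v) ps combo := rfl

theorem pvFill_shift (c : Char) (cs : List Char) (ps : List Nat) (combo : List Char) :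
    pvFill (c :: cs) (ps.map (· + 1)) combo = c :: pvFill cs ps combo := by
  induction ps generalizing cs combo with
  | nil => rfl
  | cons p ps ih =>
    cases combo with
    | nil => rfl
    | cons v combo =>
      rw [List.map_cons, pvFill_cons, pvFill_cons]
      have hset : (c :: cs).set (p + 1) v = c :: cs.set p v := rfl
      rw [hset, ih]

theorem pvCombos_succ (k : Nat) : pvCombos (k+1) = pvCombosStep (pvCombos k) := by
  simp [pvCombos, List.range_succ, List.foldl_append]

theorem pvCombosStep_map_cons (L : List (List Char)) (v : Char) :
    pvCombosStep (L.map (v ::·)) = (pvCombosStep L).map (v ::·) := by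
  simp [pvCombosStep, List.flatMap_map, List.map_flatMap, List.map_map, Function.comp_def]

theorem pvCombos_cons (k : Nat) :
    pvCombos (k+1) = pvValid.flatMap (fun v => (pvCombos k).map (v :: ·)) := by
  induction k with
  | zero => decide
  | succ k ih =>
    calc pvCombos (k+2) = pvCombosStep (pvCombos (k+1)) := pvCombos_succ (k+1)
      _ = pvCombosStep (pvValid.flatMap (fun v => (pvCombos k).map (v :: ·))) := by rw [ih]
      _ = pvValid.flatMap (fun v => pvCombosStep ((pvCombos k).map (v :: ·))) := by
            simp [pvCombosStep, List.flatMap_assoc]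
      _ = pvValid.flatMap (fun v => (pvCombosStep (pvCombos k)).map (v :: ·)) := by
            simp only [pvCombosStep_map_cons]
      _ = pvValid.flatMap (fun v => (pvCombos (k+1)).map (v :: ·)) := by rw [← pvCombos_succ]

theorem pvPermB_eq_expand (cs : List Char) :
    (pvCombos (pvJpos 0 cs).length).map (pvFill cs (pvJpos 0 cs)) = pvExpand cs := by
  induction cs with
  | nil => rfl
  | cons c cs ih =>
    by_cases hc : c = 'J'
    · subst hc
      have hjp : pvJpos 0 ('J' :: cs) = 0 :: (pvJpos 0 cs).map (· + 1) := by
        simp [pvJpos, pvJpos_shift]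
      rw [hjp]
      simp only [List.length_cons, List.length_map, pvCombos_cons, List.map_flatMap,
        List.map_map]
      rw [pvExpand]
      simp only [if_pos]
      refine List.flatMap_congr (fun v _ => ?_)
      rw [← ih, List.map_map]
      refine List.map_congr_left (fun combo _ => ?_)
      show pvFill ('J' :: cs) (0 :: (pvJpos 0 cs).map (· + 1)) (v :: combo)
          = v :: pvFill cs (pvJpos 0 cs) combo
      rw [pvFill_cons]
      show pvFill (v :: cs) ((pvJpos 0 cs).map (· + 1)) combo = _
      rw [pvFill_shift]
    · have hjp : pvJpos 0 (c :: cs) = (pvJpos 0 cs).map (· + 1) := by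
        simp [pvJpos, hc, pvJpos_shift]
      rw [hjp]
      simp only [List.length_map]
      rw [pvExpand]
      simp only [if_neg hc]
      rw [← ih, List.map_map]
      refine List.map_congr_left (fun combo _ => ?_)
      show pvFill (c :: cs) ((pvJpos 0 cs).map (· + 1)) combo = c :: pvFill cs (pvJpos 0 cs) combo
      rw [pvFill_shift]

-- ===== VERDICT (by name: the statement is the Claim_ definition above) =====
theorem permute_joker_spec : Claim_equal_permute_joker := by
  intro hand _
  unfold Spec_permute_joker permute_joker permute_joker_alt
  rw [pvPermAuxA_eq_expand]
  by_cases h : pvJpos 0 hand.toList = []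
  · have hJ : 'J' ∉ hand.toList := (pvJpos_nil_iff _ 0).mp h
    simp [h, pvExpand_no_J _ hJ]
  · simp only [if_neg h]
    rw [← pvPermB_eq_expand, List.map_map]
    rfl
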